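-- pv_equiv track=rewrite | github.com/jmartinmaster/Project-Librarian | app/search/search_engine.py | _best_preview_for_query
-- ===== SOURCE A (Python) =====
-- def _best_preview_for_query(text: str, query: str, tokens: list[str]) -> tuple[int | None, str]:
--     """Return the most relevant line number and text snippet for a query."""
--     for line_number, line in enumerate(text.splitlines(), start=1):
--         lowered = line.lower()
--         if query in lowered or all(token in lowered for token in tokens):
--             snippet = line.strip()
--             return line_number, snippet[:180]
--
--     first = next((line.strip() for line in text.splitlines() if line.strip()), "")
--     return (1 if first else None), first[:180]
-- ===== SOURCE B (Python) =====
-- def _best_preview_for_query(text: str, query: str, tokens: list[str]) -> tuple[int | None, str]: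
--     """Single pass: find first matching line; record the fallback during the same scan."""
--     fallback = None
--     for line_number, line in enumerate(text.splitlines(), start=1):
--         lowered = line.lower()
--         if query in lowered or all(token in lowered for token in tokens):
--             return line_number, line.strip()[:180]
--         if fallback is None:
--             stripped = line.strip()
--             if stripped:
--                 fallback = stripped
--     if fallback is not None:
--         return 1, fallback[:180]
--     return None, ""
-- ===== Notes on version B (the rewrite author's own statement) =====
-- stated objective: simpler
-- what changed: B folds A's second splitlines() fallback scan into the single matching loop by carrying the first non-empty stripped line as an accumulator, so the text is split and traversed once instead of twice.
import Mathlib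
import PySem

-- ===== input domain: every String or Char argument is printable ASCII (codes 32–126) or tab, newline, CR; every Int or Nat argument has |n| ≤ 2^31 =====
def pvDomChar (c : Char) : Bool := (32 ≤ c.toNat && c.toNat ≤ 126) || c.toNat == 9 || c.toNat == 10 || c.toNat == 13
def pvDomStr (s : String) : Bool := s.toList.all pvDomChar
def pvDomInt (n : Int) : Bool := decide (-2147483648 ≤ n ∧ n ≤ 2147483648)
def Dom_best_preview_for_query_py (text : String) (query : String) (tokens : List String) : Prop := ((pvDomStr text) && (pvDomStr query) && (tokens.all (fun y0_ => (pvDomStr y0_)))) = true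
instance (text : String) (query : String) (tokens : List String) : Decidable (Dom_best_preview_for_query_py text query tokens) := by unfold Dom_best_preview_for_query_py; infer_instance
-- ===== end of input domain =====

-- B merges A's second splitlines() fallback scan into the single matching loop
-- (fallback carried as an accumulator), so the lines are traversed once. Objective: simpler.

-- ===== PORT A =====
-- the 'for line_number, line in enumerate(...)' loop with its early return
def bpLoopA (query : String) (tokens : List String) : List (Int × String) → Option (Int × String)
  | [] => none
  | (n, line) :: rest =>
    let lowered := PySem.Str.lower line
    if PySem.Str.isIn query lowered || tokens.all (fun token => PySem.Str.isIn token lowered) then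
      some (n, PySem.Str.slice (PySem.Str.strip line) none (some 180))
    else bpLoopA query tokens rest

-- next((line.strip() for line in text.splitlines() if line.strip()), "")
def bpFirstA : List String → String
  | [] => ""
  | line :: rest => if PySem.Str.strip line = "" then bpFirstA rest else PySem.Str.strip line

def best_preview_for_query_py (text : String) (query : String) (tokens : List String) : Option Int × String :=
  match bpLoopA query tokens (PySem.List.enumerate (PySem.Str.splitlines text) 1) with
  | some r => (some r.1, r.2)
  | none =>
    let first := bpFirstA (PySem.Str.splitlines text)
    ((if first = "" then none else some 1), PySem.Str.slice first none (some 180))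

-- ===== PORT B =====
-- single pass: line counter and the not-yet-recorded fallback are loop state
def bpScanB (query : String) (tokens : List String) : List String → Int → Option String → Option Int × String
  | [], _, fallback =>
    match fallback with
    | some f => (some 1, PySem.Str.slice f none (some 180))
    | none => (none, "")
  | line :: rest, n, fallback =>
    let lowered := PySem.Str.lower line
    if PySem.Str.isIn query lowered || tokens.all (fun token => PySem.Str.isIn token lowered) then
      (some n, PySem.Str.slice (PySem.Str.strip line) none (some 180))
    else
      bpScanB query tokens rest (n + 1)
        (match fallback with
         | some f => some f
         | none =>
           let stripped := PySem.Str.strip line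
           if stripped = "" then none else some stripped)

def best_preview_for_query_py_alt (text : String) (query : String) (tokens : List String) : Option Int × String :=
  bpScanB query tokens (PySem.Str.splitlines text) 1 none

-- ===== PRECONDITION & SPEC =====
def Spec_best_preview_for_query_py (text : String) (query : String) (tokens : List String) (out : Option Int × String) : Prop := out = best_preview_for_query_py_alt text query tokens
instance (text : String) (query : String) (tokens : List String) (out : Option Int × String) : Decidable (Spec_best_preview_for_query_py text query tokens out) := by unfold Spec_best_preview_for_query_py; infer_instance

-- ===== CLAIM (what is proved, stated in full; the proofs are below) =====
def Claim_equal_best_preview_for_query_py : Prop := ∀ (text : String) (query : String) (tokens : List String), Dom_best_preview_for_query_py text query tokens → Spec_best_preview_for_query_py text query tokens (best_preview_for_query_py text query tokens)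

-- ===== LEMMAS AND PROOFS =====
theorem slice_empty_180 : PySem.Str.slice "" none (some 180) = "" := by decide

-- the loop invariant: B's scan equals A's match loop, with A's fallback pass replayed on
-- the remaining lines whenever B has not yet recorded a fallback
theorem bpScan_eq (query : String) (tokens : List String) :
    ∀ (lines : List String) (n : Int) (fb : Option String),
      (∀ f, fb = some f → f ≠ "") →
      bpScanB query tokens lines n fb =
        match bpLoopA query tokens (PySem.List.enumerate lines n) with
        | some r => (some r.1, r.2)
        | none =>
          let first := match fb with | some f => f | none => bpFirstA lines
          ((if first = "" then none else some 1), PySem.Str.slice first none (some 180)) := by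
  intro lines
  induction lines with
  | nil =>
    intro n fb hfb
    simp only [PySem.List.enumerate_nil, bpLoopA, bpScanB]
    cases fb with
    | none => simp [bpFirstA, slice_empty_180]
    | some f =>
      have hf : f ≠ "" := hfb f rfl
      simp [hf]
  | cons line rest ih =>
    intro n fb hfb
    rw [PySem.List.enumerate_cons]
    simp only [bpLoopA, bpScanB]
    by_cases hc : (PySem.Str.isIn query (PySem.Str.lower line)
        || tokens.all (fun token => PySem.Str.isIn token (PySem.Str.lower line))) = true
    · rw [if_pos hc, if_pos hc]
    · rw [if_neg hc, if_neg hc]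
      have hfb'' : ∀ f, (match fb with
          | some f => some f
          | none => if PySem.Str.strip line = "" then none
                    else some (PySem.Str.strip line)) = some f → f ≠ "" := by
        intro f hf
        cases fb with
        | some g => exact hfb f (by simpa using hf)
        | none =>
          by_cases hs : PySem.Str.strip line = ""
          · simp [hs] at hf
          · simp only [hs, if_false] at hf
            cases hf; exact hs
      rw [ih (n + 1) _ hfb'']
      cases h : bpLoopA query tokens (PySem.List.enumerate rest (n + 1)) with
      | some r => rfl
      | none =>
        simp only
        cases fb with
        | some f => rfl
        | none =>
          simp only [bpFirstA]
          by_cases hs : PySem.Str.strip line = "" <;> simp [hs]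

-- ===== VERDICT (by name: the statement is the Claim_ definition above) =====
theorem best_preview_for_query_py_spec : Claim_equal_best_preview_for_query_py := by
  intro text query tokens _hdom
  unfold Spec_best_preview_for_query_py best_preview_for_query_py best_preview_for_query_py_alt
  rw [bpScan_eq query tokens (PySem.Str.splitlines text) 1 none (by intro f h; cases h)]
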